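-- pv_equiv track=rewrite | github.com/anavaicum/PyCharm- | lab 2/lab 2 hausaufgabe.py | secventa_maxima
-- ===== SOURCE A (Python) =====
-- def secventa_domino(numar1, numar2):
--
--     return numar1 % 10 == numar2 // 10 or numar1 // 10 == numar2 %10
--
-- def secventa_maxima(numere):
--     max_l = 1
--     max_start_ind = 0
--     current_l = 1
--     current_ind = 0
--
--     for i in range(1, len(numere)):
--         if secventa_domino(numere[i - 1], numere[i]):
--             current_l += 1
--         else:
--             if current_l > max_l:
--                 max_l = current_l
--                 max_start_ind = current_ind
--             current_l = 1
--             current_ind = i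
--
--     if current_l > max_l:
--         max_l = current_l
--         max_start_ind = current_ind
--
--     if max_l > 1:
--         return numere[max_start_ind:max_start_ind + max_l]
--     else:
--         return None
-- ===== SOURCE B (Python) =====
-- def secventa_domino(numar1, numar2):
--     return numar1 % 10 == numar2 // 10 or numar1 // 10 == numar2 % 10
--
-- def secventa_maxima(numere):
--     # Partition the list into maximal domino-chained runs, then pick the
--     # first longest run; return it if it has more than one element.
--     if not numere:
--         return None
--     runs = []
--     cur = [numere[0]]
--     prev = numere[0]
--     for x in numere[1:]:
--         if secventa_domino(prev, x):
--             cur.append(x)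
--         else:
--             runs.append(cur)
--             cur = [x]
--         prev = x
--     runs.append(cur)
--     best = runs[0]
--     for r in runs[1:]:
--         if len(r) > len(best):
--             best = r
--     return best if len(best) > 1 else None
-- ===== Notes on version B (the rewrite author's own statement) =====
-- stated objective: alternative
-- what changed: B replaces A's single index-driven scan with running best-length counters by an explicit partition of the list into maximal domino-chained runs followed by a separate first-longest-run selection pass.
import Mathlib
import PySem

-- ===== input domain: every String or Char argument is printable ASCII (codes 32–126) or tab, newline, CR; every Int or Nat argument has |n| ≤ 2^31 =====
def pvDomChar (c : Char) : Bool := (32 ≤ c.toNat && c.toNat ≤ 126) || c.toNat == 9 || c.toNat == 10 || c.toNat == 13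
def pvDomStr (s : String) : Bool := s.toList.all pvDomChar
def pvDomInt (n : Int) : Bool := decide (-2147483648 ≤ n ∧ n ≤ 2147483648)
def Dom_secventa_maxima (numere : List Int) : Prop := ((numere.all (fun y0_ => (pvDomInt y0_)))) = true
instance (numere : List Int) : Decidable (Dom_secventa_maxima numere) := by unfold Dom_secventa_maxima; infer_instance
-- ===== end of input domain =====

-- B re-implements the scan as an explicit run-partition followed by a first-longest selection (objective: alternative decomposition, same cost).

-- ===== PORT A =====
def secventa_domino (numar1 numar2 : Int) : Bool :=
  (PySem.Int.mod numar1 10 == PySem.Int.floordiv numar2 10)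
  || (PySem.Int.floordiv numar1 10 == PySem.Int.mod numar2 10)

-- the body of A's for-loop; state = (max_l, max_start_ind, current_l, current_ind)
def pvStepA (numere : List Int) (st : Int × Int × Int × Int) (i : Int) : Int × Int × Int × Int :=
  if secventa_domino (PySem.List.pyGetD numere (i - 1) 0) (PySem.List.pyGetD numere i 0) then
    (st.1, st.2.1, st.2.2.1 + 1, st.2.2.2)
  else if st.2.2.1 > st.1 then (st.2.2.1, st.2.2.2, 1, i)
  else (st.1, st.2.1, 1, i)

-- A's code after the loop: final max update, then slice-or-None
def pvFinalA (numere : List Int) (st : Int × Int × Int × Int) : Option (List Int) :=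
  let m : Int × Int := if st.2.2.1 > st.1 then (st.2.2.1, st.2.2.2) else (st.1, st.2.1)
  if m.1 > 1 then some (PySem.List.slice numere (some m.2) (some (m.2 + m.1))) else none

def secventa_maxima (numere : List Int) : Option (List Int) :=
  pvFinalA numere
    ((PySem.List.pyRange 1 (PySem.List.len numere) 1).foldl (pvStepA numere) (1, 0, 1, 0))

-- ===== PORT B =====
-- the body of B's partition loop; state = (runs, cur, prev)
def pvStepB (st : List (List Int) × List Int × Int) (x : Int) : List (List Int) × List Int × Int :=
  if secventa_domino st.2.2 x then (st.1, st.2.1 ++ [x], x)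
  else (st.1 ++ [st.2.1], [x], x)

-- 'if len(r) > len(best): best = r'
def pvPick (b r : List Int) : List Int := if r.length > b.length then r else b

-- B's selection: best = runs[0]; scan runs[1:]; runs is never empty when called (headD default is never used)
def pvFinalB (runs : List (List Int)) : Option (List Int) :=
  let best := runs.tail.foldl pvPick (runs.headD [])
  if best.length > 1 then some best else none

def secventa_maxima_alt (numere : List Int) : Option (List Int) :=
  match numere with
  | [] => none
  | n0 :: rest =>
      let st := rest.foldl pvStepB ([], [n0], n0)
      pvFinalB (st.1 ++ [st.2.1])

-- ===== PRECONDITION & SPEC =====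
def Spec_secventa_maxima (numere : List Int) (out : Option (List Int)) : Prop := out = secventa_maxima_alt numere
instance (numere : List Int) (out : Option (List Int)) : Decidable (Spec_secventa_maxima numere out) := by unfold Spec_secventa_maxima; infer_instance

-- ===== CLAIM (what is proved, stated in full; the proofs are below) =====
def Claim_equal_secventa_maxima : Prop := ∀ (numere : List Int), Dom_secventa_maxima numere → Spec_secventa_maxima numere (secventa_maxima numere)

-- ===== LEMMAS AND PROOFS =====

-- invariant tying A's (max_l, max_start_ind) to B's completed runs:
-- max_l is the length of the first longest completed run (1 if none), and when > 1
-- that run sits in l exactly at offset max_start_ind.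
def pvInv (l : List Int) (runs : List (List Int)) (maxL maxStart : Int) : Prop :=
  match runs with
  | [] => maxL = 1
  | r0 :: rs =>
      1 ≤ (rs.foldl pvPick r0).length ∧ maxL = ((rs.foldl pvPick r0).length : Int) ∧
      (1 < (rs.foldl pvPick r0).length →
        ∃ preB postB, l = preB ++ (rs.foldl pvPick r0) ++ postB ∧ maxStart = (preB.length : Int))

lemma pvSliceMid (pre mid post : List Int) :
    PySem.List.slice (pre ++ mid ++ post) (some ((pre.length : Nat) : Int))
      (some (((pre.length : Nat) : Int) + ((mid.length : Nat) : Int))) = mid := by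
  rw [PySem.List.slice_natCast_add]
  simp

lemma pvGetMid (u : List Int) (y : Int) (v : List Int) (d : Int) :
    (u ++ y :: v).getD u.length d = y := by
  simp [List.getD_eq_getElem?_getD]

lemma pvFinal_eq (l pre cur post : List Int) (runs : List (List Int)) (maxL maxStart : Int)
    (hcur : cur ≠ []) (hl : l = pre ++ cur ++ post) (hinv : pvInv l runs maxL maxStart) :
    pvFinalA l (maxL, maxStart, ((cur.length : Nat) : Int), ((pre.length : Nat) : Int))
      = pvFinalB (runs ++ [cur]) := by
  have hc1 : 1 ≤ cur.length := List.length_pos_iff.mpr hcur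
  cases runs with
  | nil =>
      simp only [pvInv] at hinv
      subst hinv
      by_cases h : 1 < cur.length
      · simp only [pvFinalA, pvFinalB, List.nil_append, List.tail, List.headD, List.foldl_nil]
        simp only [show ((cur.length : Nat) : Int) > 1 from by exact_mod_cast h, if_pos]
        simp only [if_pos h]
        rw [hl, pvSliceMid]
      · have he : cur.length = 1 := by omega
        simp [pvFinalA, pvFinalB, he]
  | cons r0 rs =>
      obtain ⟨hb1, hml, hdec⟩ := hinv
      set b := rs.foldl pvPick r0 with hbdef
      have hfold : ((r0 :: rs) ++ [cur]).tail.foldl pvPick (((r0 :: rs) ++ [cur]).headD [])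
          = pvPick b cur := by
        simp [List.foldl_append, hbdef]
      simp only [pvFinalB, hfold, pvFinalA, hml]
      by_cases hcb : b.length < cur.length
      · have h2 : 1 < cur.length := lt_of_le_of_lt hb1 hcb
        simp only [pvPick, if_pos hcb]
        simp only [show ((cur.length : Nat) : Int) > (b.length : Int) from by exact_mod_cast hcb, if_pos]
        simp only [show ((cur.length : Nat) : Int) > 1 from by exact_mod_cast h2, if_pos]
        simp only [if_pos h2]
        rw [hl, pvSliceMid]
      · simp only [pvPick, if_neg hcb]
        simp only [show ¬ (((cur.length : Nat) : Int) > (b.length : Int)) from by exact_mod_cast hcb, if_false]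
        by_cases hb2 : 1 < b.length
        · obtain ⟨preB, postB, hlB, hms⟩ := hdec hb2
          simp only [show ((b.length : Nat) : Int) > 1 from by exact_mod_cast hb2, if_pos]
          simp only [if_pos hb2]
          rw [hms, hlB, pvSliceMid]
        · simp only [show ¬ (((b.length : Nat) : Int) > 1) from by exact_mod_cast hb2, if_false]
          simp only [if_neg hb2]
lemma pvInv_step (l pre cur post : List Int) (runs : List (List Int)) (maxL maxStart : Int)
    (hcur : cur ≠ []) (hl : l = pre ++ cur ++ post) (hinv : pvInv l runs maxL maxStart) :
    pvInv l (runs ++ [cur])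
      (if ((cur.length : Nat) : Int) > maxL then ((cur.length : Nat) : Int) else maxL)
      (if ((cur.length : Nat) : Int) > maxL then ((pre.length : Nat) : Int) else maxStart) := by
  have hc1 : 1 ≤ cur.length := List.length_pos_iff.mpr hcur
  cases runs with
  | nil =>
      simp only [pvInv] at hinv
      subst hinv
      simp only [List.nil_append, pvInv, List.foldl_nil]
      by_cases h : 1 < cur.length
      · simp only [show ((cur.length : Nat) : Int) > 1 from by exact_mod_cast h, if_pos]
        exact ⟨hc1, trivial, fun _ => ⟨pre, post, hl, rfl⟩⟩
      · simp only [show ¬ (((cur.length : Nat) : Int) > 1) from by exact_mod_cast h, if_false]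
        exact ⟨hc1, by omega, fun hh => absurd hh h⟩
  | cons r0 rs =>
      obtain ⟨hb1, hml, hdec⟩ := hinv
      set b := rs.foldl pvPick r0 with hbdef
      have hfold : ((rs ++ [cur]).foldl pvPick r0) = pvPick b cur := by
        simp [List.foldl_append, hbdef]
      simp only [pvInv, List.cons_append, hfold]
      subst hml
      by_cases hcb : b.length < cur.length
      · simp only [pvPick, if_pos hcb,
          show ((cur.length : Nat) : Int) > (b.length : Int) from by exact_mod_cast hcb, if_pos]
        exact ⟨hc1, trivial, fun _ => ⟨pre, post, hl, rfl⟩⟩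
      · simp only [pvPick, if_neg hcb,
          show ¬ (((cur.length : Nat) : Int) > (b.length : Int)) from by exact_mod_cast hcb]
        exact ⟨hb1, by simp, hdec⟩
lemma pvMain (l : List Int) (xs : List Int) :
    ∀ (pre cur0 : List Int) (prev : Int) (runs : List (List Int)) (maxL maxStart : Int),
      l = pre ++ cur0 ++ prev :: xs →
      pvInv l runs maxL maxStart →
      pvFinalA l ((PySem.List.pyRange ((pre.length + cur0.length + 1 : Nat) : Int)
            (PySem.List.len l) 1).foldl (pvStepA l)
          (maxL, maxStart, ((cur0.length + 1 : Nat) : Int), ((pre.length : Nat) : Int)))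
        = pvFinalB ((xs.foldl pvStepB (runs, cur0 ++ [prev], prev)).1
            ++ [(xs.foldl pvStepB (runs, cur0 ++ [prev], prev)).2.1]) := by
  induction xs with
  | nil =>
      intro pre cur0 prev runs maxL maxStart hl hinv
      have hlen : l.length = pre.length + cur0.length + 1 := by subst hl; simp; omega
      rw [PySem.List.len_eq, PySem.List.pyRange_one_eq_nil (by rw [hlen])]
      simp only [List.foldl_nil]
      have h := pvFinal_eq l pre (cur0 ++ [prev]) [] runs maxL maxStart (by simp)
        (by simp [hl]) hinv
      simp at h
      exact h
  | cons x xs ih =>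
      intro pre cur0 prev runs maxL maxStart hl hinv
      have hlen : l.length = pre.length + cur0.length + 1 + (xs.length + 1) := by
        subst hl; simp; omega
      rw [PySem.List.len_eq, PySem.List.pyRange_one_cons (by rw [hlen]; exact_mod_cast by omega)]
      rw [List.foldl_cons]
      have e1 : ((pre.length + cur0.length + 1 : Nat) : Int) - 1
          = ((pre.length + cur0.length : Nat) : Int) := by push_cast; ring
      have hprev : PySem.List.pyGetD l ((pre.length + cur0.length : Nat) : Int) 0 = prev := by
        rw [PySem.List.pyGetD_natCast]
        have h2 : l = (pre ++ cur0) ++ prev :: (x :: xs) := by simp [hl]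
        rw [show pre.length + cur0.length = (pre ++ cur0).length by simp, h2]
        exact pvGetMid (pre ++ cur0) prev (x :: xs) 0
      have hx : PySem.List.pyGetD l ((pre.length + cur0.length + 1 : Nat) : Int) 0 = x := by
        rw [PySem.List.pyGetD_natCast]
        have h2 : l = (pre ++ cur0 ++ [prev]) ++ x :: xs := by simp [hl]
        rw [show pre.length + cur0.length + 1 = (pre ++ cur0 ++ [prev]).length by simp; omega, h2]
        exact pvGetMid (pre ++ cur0 ++ [prev]) x xs 0
      simp only [pvStepA, e1, hprev, hx]
      simp only [List.foldl_cons, pvStepB]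
      by_cases hd : secventa_domino prev x
      · simp only [hd, if_true]
        have h := ih pre (cur0 ++ [prev]) x runs maxL maxStart (by simp [hl]) hinv
        simp only [PySem.List.len_eq, List.length_append, List.length_singleton] at h ⊢
        have e2 : ((pre.length + cur0.length + 1 : Nat) : Int) + 1
            = ((pre.length + (cur0.length + 1) + 1 : Nat) : Int) := by push_cast; ring
        have e3 : ((cur0.length + 1 : Nat) : Int) + 1 = ((cur0.length + 1 + 1 : Nat) : Int) := by
          push_cast; ring
        rw [e2, e3]
        exact h
      · simp only [hd, if_false, Bool.false_eq_true]
        have hinv' := pvInv_step l pre (cur0 ++ [prev]) (x :: xs) runs maxL maxStart (by simp)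
          (by simp [hl]) hinv
        simp only [List.length_append, List.length_singleton] at hinv'
        by_cases hgt : ((cur0.length + 1 : Nat) : Int) > maxL
        · simp only [hgt, if_pos] at hinv' ⊢
          have h := ih (pre ++ cur0 ++ [prev]) [] x (runs ++ [cur0 ++ [prev]])
            ((cur0.length + 1 : Nat) : Int) ((pre.length : Nat) : Int)
            (by simp [hl]) hinv'
          simp only [PySem.List.len_eq, List.length_append, List.length_singleton,
            List.length_nil, List.nil_append] at h ⊢
          have e2 : ((pre.length + cur0.length + 1 : Nat) : Int) + 1
              = ((pre.length + cur0.length + 1 + 0 + 1 : Nat) : Int) := by push_cast; ring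
          rw [e2]
          convert h using 3
        · simp only [hgt, if_false] at hinv' ⊢
          have h := ih (pre ++ cur0 ++ [prev]) [] x (runs ++ [cur0 ++ [prev]]) maxL maxStart
            (by simp [hl]) hinv'
          simp only [PySem.List.len_eq, List.length_append, List.length_singleton,
            List.length_nil, List.nil_append] at h ⊢
          convert h using 3

-- ===== VERDICT (by name: the statement is the Claim_ definition above) =====
theorem secventa_maxima_spec : Claim_equal_secventa_maxima := by
  intro numere _
  unfold Spec_secventa_maxima
  cases numere with
  | nil => rfl
  | cons n0 rest =>
      have h := pvMain (n0 :: rest) rest [] [] n0 [] 1 0 (by simp) (by simp [pvInv])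
      simpa [secventa_maxima, secventa_maxima_alt] using h
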